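-- pv_equiv track=rewrite | github.com/kavinash-samsung/algorithm-practice | Aditya Verma/Recursion/permutation with spaces.py | helper
-- ===== SOURCE A (Python) =====
-- def helper(array):
--     if array == "":
--         return [""]
--     x = array[0]
--     res = helper(array[1:])
--     witha= []
--     without = []
--
--     for i in range(len(res)):
--         without.append(x + res[i])
--     for i in range(len(res)):
--         witha.append("_"+x+res[i])
--
--     return without+witha
-- ===== SOURCE B (Python) =====
-- def helper(array):
--     n = len(array)
--     out = []
--     for mask in range(1 << n):
--         s = ""
--         for i, c in enumerate(array):
--             s += "_" + c if (mask >> (n - 1 - i)) & 1 else c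
--         out.append(s)
--     return out
-- ===== Notes on version B (the rewrite author's own statement) =====
-- stated objective: alternative
-- what changed: Replaces A's recursion that builds and concatenates two result lists per character with a flat iterative enumeration over bitmasks 0..2^n-1, building each output string independently ('_' before char i iff bit n-1-i of the mask is set).
import Mathlib
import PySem

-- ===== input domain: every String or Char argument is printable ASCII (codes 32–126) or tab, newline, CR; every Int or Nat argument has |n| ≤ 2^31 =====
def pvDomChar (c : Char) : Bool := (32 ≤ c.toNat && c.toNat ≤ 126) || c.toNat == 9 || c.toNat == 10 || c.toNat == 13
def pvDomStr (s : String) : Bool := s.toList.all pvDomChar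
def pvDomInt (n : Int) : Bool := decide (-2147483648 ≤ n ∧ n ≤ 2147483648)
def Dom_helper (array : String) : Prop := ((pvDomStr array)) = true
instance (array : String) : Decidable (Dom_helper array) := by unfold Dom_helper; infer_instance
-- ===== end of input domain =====

-- B differs from A by a flat bitmask enumeration instead of a recursive two-list build; same output list, same order.
-- Strings are handled as List Char internally (String.mk at the end), exact on the ASCII domain.

-- ===== PORT A =====
-- A's recursion: helper("") = [""], else without = [x+r for r in res], witha = ["_"+x+r for r in res], without ++ witha
def pvHelperA : List Char → List (List Char)
  | [] => [[]]
  | x :: rest =>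
      let res := pvHelperA rest
      let without := res.foldl (fun acc r => acc ++ [x :: r]) []
      let witha := res.foldl (fun acc r => acc ++ ['_' :: x :: r]) []
      without ++ witha

def helper (array : String) : List String :=
  (pvHelperA array.toList).map String.mk

-- ===== PORT B =====
-- one output string for a given mask: scan (char, index) pairs, '_' before char i iff bit (n-1-i) of mask is set
def pvBuild (cs : List Char) (n : Nat) (mask : Nat) : List Char :=
  cs.zipIdx.foldl
    (fun acc p => acc ++ (if (mask >>> (n - 1 - p.2)) % 2 = 1 then ['_', p.1] else [p.1])) []

def helper_alt (array : String) : List String :=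
  let cs := array.toList
  let n := cs.length
  (List.range (2 ^ n)).foldl (fun out mask => out ++ [String.mk (pvBuild cs n mask)]) []

-- ===== PRECONDITION & SPEC =====
def Spec_helper (array : String) (out : List String) : Prop := out = helper_alt array
instance (array : String) (out : List String) : Decidable (Spec_helper array out) := by unfold Spec_helper; infer_instance

-- ===== CLAIM (what is proved, stated in full; the proofs are below) =====
def Claim_equal_helper : Prop := ∀ (array : String), Dom_helper array → Spec_helper array (helper array)

-- ===== LEMMAS AND PROOFS =====

-- recursive reformulation of pvBuild (shift counter k = n-1-index)
def pvBRec : List Char → Nat → Nat → List Char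
  | [], _, _ => []
  | c :: cs, k, m => (if (m >>> k) % 2 = 1 then ['_', c] else [c]) ++ pvBRec cs (k - 1) m

theorem pvBuild_aux (cs : List Char) (n m : Nat) :
    ∀ (s : Nat) (acc : List Char),
      (cs.zipIdx s).foldl
        (fun acc p => acc ++ (if (m >>> (n - 1 - p.2)) % 2 = 1 then ['_', p.1] else [p.1])) acc
      = acc ++ pvBRec cs (n - 1 - s) m := by
  induction cs with
  | nil => intro s acc; simp [pvBRec]
  | cons c cs ih =>
      intro s acc
      simp only [List.zipIdx_cons, List.foldl_cons, pvBRec]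
      rw [ih (s + 1)]
      have : n - 1 - (s + 1) = n - 1 - s - 1 := by omega
      rw [this, List.append_assoc]

theorem pvBuild_eq (cs : List Char) (n m : Nat) :
    pvBuild cs n m = pvBRec cs (n - 1) m := by
  have h := pvBuild_aux cs n m 0 []
  simpa [pvBuild] using h

theorem pvBit_add_pow {k r m : Nat} (hk : k < r) :
    ((2 ^ r + m) >>> k) % 2 = (m >>> k) % 2 := by
  have hpow : 2 ^ r = 2 * 2 ^ (r - 1 - k) * 2 ^ k := by
    rw [← pow_succ']
    rw [← pow_add]
    congr 1
    omega
  rw [Nat.shiftRight_eq_div_pow, Nat.shiftRight_eq_div_pow, hpow,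
    Nat.add_comm, Nat.add_mul_div_right _ _ (Nat.pow_pos (show 0 < 2 by norm_num)),
    Nat.add_mul_mod_self_left]

theorem pvBRec_add_pow (cs : List Char) {k r m : Nat} (hk : k < r) :
    pvBRec cs k (2 ^ r + m) = pvBRec cs k m := by
  induction cs generalizing k with
  | nil => rfl
  | cons c cs ih =>
      simp only [pvBRec, pvBit_add_pow hk, ih (show k - 1 < r by omega)]

theorem pvShift_lt {m r : Nat} (hm : m < 2 ^ r) : (m >>> r) % 2 = 0 := by
  rw [Nat.shiftRight_eq_div_pow, Nat.div_eq_of_lt hm]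

theorem pvShift_add_pow {m r : Nat} (hm : m < 2 ^ r) : ((2 ^ r + m) >>> r) % 2 = 1 := by
  rw [Nat.shiftRight_eq_div_pow]
  have : (2 ^ r + m) / 2 ^ r = 1 := by
    rw [Nat.add_div_left _ (Nat.pow_pos (show 0 < 2 by norm_num)), Nat.div_eq_of_lt hm]
  rw [this]

theorem pvMain (cs : List Char) :
    pvHelperA cs = (List.range (2 ^ cs.length)).map (fun m => pvBRec cs (cs.length - 1) m) := by
  induction cs with
  | nil => simp [pvHelperA, pvBRec]
  | cons x rest ih =>
      have hr : rest.length + 1 - 1 = rest.length := by omega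
      simp only [pvHelperA, ih, PySem.List.foldl_append_singleton_eq_map, List.nil_append,
        List.map_map, List.length_cons, hr]
      have hsplit : (2 : Nat) ^ (rest.length + 1) = 2 ^ rest.length + 2 ^ rest.length := by
        rw [pow_succ]; omega
      rw [hsplit, List.range_add, List.map_append, List.map_map]
      congr 1
      · apply List.map_congr_left
        intro m hm
        have hm' : m < 2 ^ rest.length := List.mem_range.mp hm
        simp [Function.comp, pvBRec, pvShift_lt hm']
      · apply List.map_congr_left
        intro m hm
        have hm' : m < 2 ^ rest.length := List.mem_range.mp hm
        simp only [Function.comp, pvBRec, pvShift_add_pow hm']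
        cases rest with
        | nil => rfl
        | cons a l =>
            rw [pvBRec_add_pow (a :: l)
              (show (a :: l).length - 1 < (a :: l).length by simp)]
            rfl

-- ===== VERDICT (by name: the statement is the Claim_ definition above) =====
theorem helper_spec : Claim_equal_helper := by
  intro array _
  unfold Spec_helper helper helper_alt
  rw [pvMain, PySem.List.foldl_append_singleton_eq_map, List.nil_append, List.map_map]
  apply List.map_congr_left
  intro m _
  simp [Function.comp, pvBuild_eq]
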